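-- pv_equiv track=rewrite | github.com/cvlab-ai/splinter | inference_engine/src/preprocessing/crop/crop.py | __find_extreme_squares
-- ===== SOURCE A (Python) =====
-- def __find_extreme_squares(squares):
--     """
--     Find the square closest to the top left
--     and bottom right corners of the image
--     """
--     nearest_square = None
--     farest_square = None
--     min_distance = float('inf')
--     max_distance = float('-inf')
--     for square in squares:
--         x, y, _, _ = square
--         distance = x + y # L1
--         if distance < min_distance:
--             min_distance = distance
--             nearest_square = square
--         if distance > max_distance:
--             max_distance = distance
--             farest_square = square
--     return nearest_square, farest_square
-- ===== SOURCE B (Python) =====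
-- def __find_extreme_squares(squares):
--     """
--     Find the square closest to the top left
--     and bottom right corners of the image
--     """
--     if not squares:
--         return None, None
--     key = lambda s: s[0] + s[1]
--     return sorted(squares, key=key)[0], sorted(squares, key=key, reverse=True)[0]
-- ===== Notes on version B (the rewrite author's own statement) =====
-- stated objective: alternative
-- what changed: Replaces the single four-accumulator tracking loop by sort-then-pick: one stable ascending sort and one stable descending sort on the key x+y, returning the head of each; stability makes each head the first-occurring extremum, exactly A's strict-comparison tie-breaking.
import Mathlib
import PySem

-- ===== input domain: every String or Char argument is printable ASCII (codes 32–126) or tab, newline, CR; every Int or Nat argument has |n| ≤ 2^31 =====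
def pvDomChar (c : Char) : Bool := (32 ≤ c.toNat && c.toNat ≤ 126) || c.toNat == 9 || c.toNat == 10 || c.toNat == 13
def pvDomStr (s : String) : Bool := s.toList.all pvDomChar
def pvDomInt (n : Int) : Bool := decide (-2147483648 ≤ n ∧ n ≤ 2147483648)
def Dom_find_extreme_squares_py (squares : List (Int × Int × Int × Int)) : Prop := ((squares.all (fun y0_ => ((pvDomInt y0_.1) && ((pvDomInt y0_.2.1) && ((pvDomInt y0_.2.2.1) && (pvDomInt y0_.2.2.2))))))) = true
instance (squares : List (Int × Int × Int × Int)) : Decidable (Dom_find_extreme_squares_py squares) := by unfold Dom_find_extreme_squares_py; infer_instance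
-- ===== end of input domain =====

-- B replaces A's single tracking loop by two stable sorts on key x+y, taking each head (alternative decomposition; return-value equivalence).


-- ===== PORT A =====
-- Loop body of A: state = (nearest_square, farest_square, min_distance, max_distance);
-- `none` as a distance stands for the float('inf') / float('-inf') seed, which every int beats.
def pvStepA (acc : Option (Int × Int × Int × Int) × Option (Int × Int × Int × Int) × Option Int × Option Int)
    (square : Int × Int × Int × Int) :
    Option (Int × Int × Int × Int) × Option (Int × Int × Int × Int) × Option Int × Option Int :=
  let d := square.1 + square.2.1
  let (ns, md) :=
    if (match acc.2.2.1 with | none => true | some m => decide (d < m)) = true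
    then (some square, some d) else (acc.1, acc.2.2.1)
  let (fs, xd) :=
    if (match acc.2.2.2 with | none => true | some m => decide (m < d)) = true
    then (some square, some d) else (acc.2.1, acc.2.2.2)
  (ns, fs, md, xd)

def find_extreme_squares_py (squares : List (Int × Int × Int × Int)) : (Option (Int × Int × Int × Int)) × (Option (Int × Int × Int × Int)) :=
  let r := squares.foldl pvStepA (none, none, none, none)
  (r.1, r.2.1)

-- ===== PORT B =====
-- B's key function: key = lambda s: s[0] + s[1]
def pvKey (s : Int × Int × Int × Int) : Int := s.1 + s.2.1

def find_extreme_squares_py_alt (squares : List (Int × Int × Int × Int)) : (Option (Int × Int × Int × Int)) × (Option (Int × Int × Int × Int)) :=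
  match squares with
  | [] => (none, none)
  | _ :: _ =>
      -- sorted(squares, key=key)[0] and sorted(squares, key=key, reverse=True)[0];
      -- both sorted lists are nonempty, so head? is `some` of Python's [0].
      ((PySem.List.sorted squares pvKey false).head?,
       (PySem.List.sorted squares pvKey true).head?)

-- ===== PRECONDITION & SPEC =====
def Spec_find_extreme_squares_py (squares : List (Int × Int × Int × Int)) (out : (Option (Int × Int × Int × Int)) × (Option (Int × Int × Int × Int))) : Prop := out = find_extreme_squares_py_alt squares
instance (squares : List (Int × Int × Int × Int)) (out : (Option (Int × Int × Int × Int)) × (Option (Int × Int × Int × Int))) : Decidable (Spec_find_extreme_squares_py squares out) := by unfold Spec_find_extreme_squares_py; infer_instance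

-- ===== CLAIM (what is proved, stated in full; the proofs are below) =====
def Claim_equal_find_extreme_squares_py : Prop := ∀ (squares : List (Int × Int × Int × Int)), Dom_find_extreme_squares_py squares → Spec_find_extreme_squares_py squares (find_extreme_squares_py squares)

-- ===== LEMMAS AND PROOFS =====

-- Invariant: once both accumulators are `some`, A's loop runs the two first-extremum
-- scans in lockstep, with the distance slots equal to the keys of the current extremes.
lemma pv_loop_inv : ∀ (xs : List (Int × Int × Int × Int)) (n f : Int × Int × Int × Int),
    xs.foldl pvStepA (some n, some f, some (pvKey n), some (pvKey f)) =
      (xs.foldl (fun acc x => match acc with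
          | none => some x
          | some m => if pvKey x < pvKey m then some x else some m) (some n),
       xs.foldl (fun acc x => match acc with
          | none => some x
          | some m => if pvKey m < pvKey x then some x else some m) (some f),
       (xs.foldl (fun acc x => match acc with
          | none => some x
          | some m => if pvKey x < pvKey m then some x else some m) (some n)).map pvKey,
       (xs.foldl (fun acc x => match acc with
          | none => some x
          | some m => if pvKey m < pvKey x then some x else some m) (some f)).map pvKey) := by
  intro xs
  induction xs with
  | nil => intro n f; simp [List.foldl]
  | cons x t ih =>
      intro n f
      simp only [List.foldl, pvStepA, pvKey, decide_eq_true_eq]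
      split_ifs with h1 h2 h2 <;> exact ih _ _

-- The head of an insertBy-fold is the first-extremum scan of the inputs.
lemma pv_head_foldl_insertBy {α : Type} (before : α → α → Bool)
    (xs : List α) (acc : List α) :
    (xs.foldl (fun a x => PySem.List.insertBy before x a) acc).head? =
      xs.foldl (fun s x => match s with
        | none => some x
        | some m => if before x m then some x else some m) acc.head? := by
  induction xs generalizing acc with
  | nil => rfl
  | cons x t ih =>
      simp only [List.foldl]
      rw [ih]
      congr 1
      cases acc with
      | nil => rfl
      | cons y ys =>
          simp only [PySem.List.insertBy]
          split <;> simp_all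

theorem find_extreme_squares_py_main : ∀ (squares : List (Int × Int × Int × Int)),
    find_extreme_squares_py squares = find_extreme_squares_py_alt squares := by
  intro squares
  cases squares with
  | nil => rfl
  | cons x t =>
      show (let r := (x :: t).foldl pvStepA (none, none, none, none); (r.1, r.2.1)) = _
      have hstep : pvStepA (none, none, none, none) x
          = (some x, some x, some (pvKey x), some (pvKey x)) := by
        simp [pvStepA, pvKey]
      simp only [List.foldl, hstep, pv_loop_inv t x x]
      simp only [find_extreme_squares_py_alt,
        PySem.List.sorted_eq_foldl_insertBy, PySem.List.sorted_rev_eq_foldl_insertBy,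
        List.foldl, PySem.List.insertBy,
        pv_head_foldl_insertBy]
      refine Prod.ext ?_ ?_ <;> dsimp only <;>
        refine List.foldl_ext _ _ _ (fun a y _ => ?_) <;> cases a <;>
        simp [decide_eq_true_eq]

-- ===== VERDICT (by name: the statement is the Claim_ definition above) =====
theorem find_extreme_squares_py_spec : Claim_equal_find_extreme_squares_py := by
  intro squares _
  exact find_extreme_squares_py_main squares
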